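-- pv_equiv track=rewrite | github.com/harshitpoddar09/InterviewBit-Solutions | Programming/Strings/String Simulation/Vowel And Consonant Substrings!.py | solve
-- ===== SOURCE A (Python) =====
-- def solve(A):
--     vowel=0
--     cons=0
--     v={'a','e','i','o','u'}
--     ans=0
--     for i in A:
--         if i in v:
--             ans+=cons
--             vowel+=1
--         else:
--             ans+=vowel
--             cons+=1
--     return ans%(10**9+7)
-- ===== SOURCE B (Python) =====
-- def solve(A):
--     V = sum(1 for c in A if c in 'aeiou')
--     return (V * (len(A) - V)) % (10**9 + 7)
-- ===== Notes on version B (the rewrite author's own statement) =====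
-- stated objective: simpler
-- what changed: Replaces the incremental pair-accumulation loop over three counters with the closed-form product V*(len(A)-V) of vowel and non-vowel counts, taken modulo 10^9+7.
import Mathlib
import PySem

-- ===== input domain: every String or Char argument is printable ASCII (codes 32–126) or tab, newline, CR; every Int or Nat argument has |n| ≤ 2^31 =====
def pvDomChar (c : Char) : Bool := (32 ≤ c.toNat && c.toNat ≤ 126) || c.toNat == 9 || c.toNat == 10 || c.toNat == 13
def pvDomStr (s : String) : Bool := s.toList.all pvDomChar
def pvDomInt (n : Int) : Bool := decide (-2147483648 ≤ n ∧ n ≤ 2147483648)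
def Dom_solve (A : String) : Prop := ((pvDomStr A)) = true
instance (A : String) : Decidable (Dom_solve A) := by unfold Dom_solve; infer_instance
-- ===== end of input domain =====

-- ===== PORT A =====
-- Port of A: single pass keeping (vowel, cons, ans), then mod 10^9+7.
def solveStep (st : Int × Int × Int) (i : Char) : Int × Int × Int :=
  if (['a','e','i','o','u'] : List Char).contains i then
    (st.1 + 1, st.2.1, st.2.2 + st.2.1)
  else
    (st.1, st.2.1 + 1, st.2.2 + st.1)

def solve (A : String) : Int :=
  let st := A.toList.foldl solveStep (0, 0, 0)
  PySem.Int.mod st.2.2 (10 ^ 9 + 7)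

-- ===== PORT B =====
-- Port of B: closed form V*(len-V) mod 10^9+7, V = number of vowels.
def solve_alt (A : String) : Int :=
  let V : Int := ((A.toList.filter (fun c => "aeiou".toList.contains c)).length : Int)
  PySem.Int.mod (V * ((A.toList.length : Int) - V)) (10 ^ 9 + 7)

-- ===== PRECONDITION & SPEC =====
def Spec_solve (A : String) (out : Int) : Prop := out = solve_alt A
instance (A : String) (out : Int) : Decidable (Spec_solve A out) := by unfold Spec_solve; infer_instance

-- ===== CLAIM (what is proved, stated in full; the proofs are below) =====
def Claim_equal_solve : Prop := ∀ (A : String), Dom_solve A → Spec_solve A (solve A)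

-- ===== LEMMAS AND PROOFS =====

theorem solve_loop_inv (p : Char → Bool) (l : List Char) : ∀ (v c a : Int),
    (l.foldl (fun (st : Int × Int × Int) i =>
        if p i then (st.1 + 1, st.2.1, st.2.2 + st.2.1)
        else (st.1, st.2.1 + 1, st.2.2 + st.1)) (v, c, a)).2.2 =
      a + v * ((l.countP (fun i => p i = false) : Nat) : Int)
        + c * ((l.countP p : Nat) : Int)
        + ((l.countP p : Nat) : Int) * ((l.countP (fun i => p i = false) : Nat) : Int) := by
  induction l with
  | nil => simp
  | cons x t ih =>
    intro v c a
    by_cases hx : p x = true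
    · simp only [List.foldl_cons, hx, if_true, ih, List.countP_cons]
      simp
      ring
    · simp only [List.foldl_cons, hx, ih, List.countP_cons]
      simp
      ring

theorem countP_split (p : Char → Bool) (l : List Char) :
    l.countP p + l.countP (fun i => p i = false) = l.length := by
  induction l with
  | nil => simp
  | cons x t ih =>
    simp only [List.countP_cons, List.length_cons]
    by_cases hx : p x = true <;> simp [hx] at ih ⊢ <;> omega

-- ===== VERDICT (by name: the statement is the Claim_ definition above) =====
theorem solve_spec : Claim_equal_solve := by
  intro A _
  unfold Spec_solve solve solve_alt
  have hs : "aeiou".toList = (['a','e','i','o','u'] : List Char) := by decide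
  simp only [hs]
  rw [show List.foldl solveStep =
      List.foldl (fun (st : Int × Int × Int) i =>
        if (['a','e','i','o','u'] : List Char).contains i then (st.1 + 1, st.2.1, st.2.2 + st.2.1)
        else (st.1, st.2.1 + 1, st.2.2 + st.1)) from rfl]
  rw [solve_loop_inv]
  rw [← List.countP_eq_length_filter]
  congr 1
  have h := countP_split (fun i => (['a','e','i','o','u'] : List Char).contains i) A.toList
  have h2 : ((A.toList.length : Nat) : Int)
      - ((A.toList.countP (fun i => (['a','e','i','o','u'] : List Char).contains i) : Nat) : Int)
      = ((A.toList.countP (fun i => (['a','e','i','o','u'] : List Char).contains i = false) : Nat) : Int) := by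
    omega
  rw [h2]
  ring
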